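-- pv_equiv track=rewrite | github.com/twkun/MEFE_Python | tools.py | data_up_count
-- ===== SOURCE A (Python) =====
-- def data_up_count(dt,index):
--     start = -1
--     sum = 0
--     for x in range(index,len(dt)):
--         if dt[x] > 0:
--             if start == -1:
--                 start = x
--         if start != -1:
--             if dt[x] > 0:
--                 sum += 1
--             else:
--                 break
--     return start,sum
-- ===== SOURCE B (Python) =====
-- def data_up_count(dt, index):
--     mask = [v > 0 for v in dt[index:]]
--     if True not in mask:
--         return -1, 0
--     k = mask.index(True)
--     rest = mask[k:]
--     run = rest.index(False) if False in rest else len(rest)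
--     return index + k, run
-- ===== Notes on version B (the rewrite author's own statement) =====
-- stated objective: idiomatic
-- what changed: Replaces A's flag-driven index loop (start==-1 sentinel interleaved with counting and break) by a loop-free formulation: build a boolean positivity mask of the suffix slice once, then locate the run boundaries with membership tests and list.index.
-- outside the precondition, e.g. on data_up_count([-1, 2], -2): A returns (1, 1), B returns (-1, 1); on data_up_count([5], -1): A returns (0, 1), B returns (-1, 1); on data_up_count([-3], -1): A returns (-1, 0), B returns (-1, 0)
import Mathlib
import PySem

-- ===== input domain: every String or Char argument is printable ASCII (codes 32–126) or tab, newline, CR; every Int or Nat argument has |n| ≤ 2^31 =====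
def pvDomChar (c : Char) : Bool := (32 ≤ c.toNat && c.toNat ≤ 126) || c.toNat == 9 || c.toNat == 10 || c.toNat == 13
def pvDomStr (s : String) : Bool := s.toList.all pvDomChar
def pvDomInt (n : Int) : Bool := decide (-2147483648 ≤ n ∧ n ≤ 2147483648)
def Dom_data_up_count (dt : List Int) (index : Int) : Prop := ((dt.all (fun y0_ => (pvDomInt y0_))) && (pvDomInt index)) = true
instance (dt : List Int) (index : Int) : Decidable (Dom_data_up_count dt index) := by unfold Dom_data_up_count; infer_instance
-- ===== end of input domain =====

-- B replaces A's flag-driven index loop by a loop-free formulation (boolean positivity mask of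
-- the suffix slice, run boundaries found by membership tests and list.index); objective: idiomatic.

-- ===== PORT A =====
-- dt[x]: Python subscript; inside Pre_ (0 ≤ index) every x of the range is a valid index
def pvVal (dt : List Int) (x : Int) : Int := (PySem.List.pyGet? dt x).getD 0

-- the single loop of A: state (start, sum); 'break' modelled by returning without consuming the rest
def aLoop (dt : List Int) : List Int → Int → Int → Int × Int
  | [], start, sum => (start, sum)
  | x :: xs, start, sum =>
    let v := pvVal dt x
    let start1 := if v > 0 then (if start = -1 then x else start) else start
    if start1 ≠ -1 then
      if v > 0 then aLoop dt xs start1 (sum + 1)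
      else (start1, sum)
    else aLoop dt xs start1 sum

def data_up_count (dt : List Int) (index : Int) : Int × Int :=
  aLoop dt (PySem.List.pyRange index dt.length 1) (-1) 0

-- ===== PORT B =====
def data_up_count_alt (dt : List Int) (index : Int) : Int × Int :=
  let mask := (PySem.List.slice dt (some index) none).map (fun v => decide (v > 0))
  if true ∈ mask then
    -- Python: k = mask.index(True); the membership guard guarantees the index exists
    let k : Nat := (PySem.List.index? mask true).getD 0
    let rest := PySem.List.slice mask (some (k : Int)) none
    let run : Int := if false ∈ rest then ((PySem.List.index? rest false).getD 0 : Int)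
                     else (rest.length : Int)
    (index + (k : Int), run)
  else (-1, 0)

-- ===== PRECONDITION & SPEC =====
-- Pre_ restricts to the natural domain of nonnegative start indices: it excludes negative index
-- values, where A scans via Python's negative-index wraparound and the scanned position -1 collides
-- with A's own -1 'not found' sentinel — behaviour never part of the contract — and it thereby also
-- excludes index < -len(dt), where A raises IndexError.
def Pre_data_up_count (_dt : List Int) (index : Int) : Prop := 0 ≤ index
instance (dt : List Int) (index : Int) : Decidable (Pre_data_up_count dt index) := by unfold Pre_data_up_count; infer_instance

def pvWitness_data_up_count : List Int × Int := ([1, -2, 3], 0)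

def Spec_data_up_count (dt : List Int) (index : Int) (out : Int × Int) : Prop := out = data_up_count_alt dt index
instance (dt : List Int) (index : Int) (out : Int × Int) : Decidable (Spec_data_up_count dt index out) := by unfold Spec_data_up_count; infer_instance

-- ===== CLAIM (what is proved, stated in full; the proofs are below) =====
def Claim_equal_data_up_count : Prop := ∀ (dt : List Int) (index : Int), Dom_data_up_count dt index → Pre_data_up_count dt index → Spec_data_up_count dt index (data_up_count dt index)

-- ===== LEMMAS AND PROOFS =====

-- the positivity mask of the suffix of dt starting at a (a ≥ 0): what B computes from the slice
def maskOf (dt : List Int) (a : Int) : List Bool := (dt.drop a.toNat).map (fun v => decide (v > 0))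

-- length of the leading run of `true`s
def leadT : List Bool → Int
  | [] => 0
  | b :: bs => if b then 1 + leadT bs else 0

-- B's run computation (index of first False, else length) is the leading-true count
theorem runEq (m : List Bool) :
    (if false ∈ m then ((PySem.List.index? m false).getD 0 : Int) else (m.length : Int)) = leadT m := by
  induction m with
  | nil => simp [leadT]
  | cons b bs ih =>
    cases b with
    | false => simp [leadT]
    | true =>
      rw [PySem.List.index?_cons_of_ne bs (by decide : (true : Bool) ≠ false)]
      by_cases h : false ∈ bs
      · have hs : (PySem.List.index? bs false).isSome :=
          (PySem.List.index?_isSome_iff bs false).mpr h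
        obtain ⟨j, hj⟩ := Option.isSome_iff_exists.mp hs
        have hji : (j : Int) = leadT bs := by
          rw [← ih]; simp only [h, if_true, hj, Option.getD_some]
        simp only [List.mem_cons, reduceCtorEq, false_or, h, if_true, hj, Option.map_some,
          Option.getD_some, leadT]
        rw [← hji]; push_cast; ring
      · have hli : ((bs.length : Nat) : Int) = leadT bs := by
          rw [← ih]; simp only [h, if_false]
        simp only [List.mem_cons, reduceCtorEq, false_or, h, if_false, List.length_cons, leadT,
          if_true]
        rw [← hli]; push_cast; ring

-- once started (start ≠ -1), A's loop counts while positive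
def bCount (dt : List Int) : List Int → Int → Int
  | [], s => s
  | x :: xs, s => if pvVal dt x ≤ 0 then s else bCount dt xs (s + 1)

theorem aLoop_count (dt : List Int) : ∀ (L : List Int) (start sum : Int), start ≠ -1 →
    aLoop dt L start sum = (start, bCount dt L sum) := by
  intro L
  induction L with
  | nil => intro start sum h; simp [aLoop, bCount]
  | cons x xs ih =>
    intro start sum h
    by_cases hv : pvVal dt x > 0
    · simp [aLoop, bCount, hv, h, not_le.mpr hv, ih _ _ h]
    · simp [aLoop, bCount, hv, h, not_lt.mp (by simpa using hv)]

-- drop at a valid nonnegative Int index is head :: drop of the next index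
theorem drop_toNat_cons (dt : List Int) (a : Int) (h0 : 0 ≤ a) (h : a < (dt.length : Int)) :
    ∃ (hlt : a.toNat < dt.length),
      dt.drop a.toNat = dt[a.toNat] :: dt.drop (a + 1).toNat := by
  have hlt : a.toNat < dt.length := by omega
  refine ⟨hlt, ?_⟩
  have h1 : (a + 1).toNat = a.toNat + 1 := by omega
  rw [h1]
  exact List.drop_eq_getElem_cons hlt

-- pvVal at a valid nonnegative index is the list element
theorem pvVal_eq (dt : List Int) (a : Int) (h0 : 0 ≤ a) (_h : a < (dt.length : Int)) :
    ∀ (hlt : a.toNat < dt.length), pvVal dt a = dt[a.toNat] := by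
  intro hlt
  simp [pvVal, PySem.List.pyGet?_of_nonneg dt h0, List.getElem?_eq_getElem hlt]

-- the counting pass over the index range is the leading-true count of the mask
theorem countEq (dt : List Int) : ∀ (k : Nat) (a c : Int),
    ((dt.length : Int) - a).toNat ≤ k → 0 ≤ a →
    bCount dt (PySem.List.pyRange a dt.length 1) c = c + leadT (maskOf dt a) := by
  intro k
  induction k with
  | zero =>
    intro a c hk h0
    have hna : (dt.length : Int) ≤ a := by omega
    rw [PySem.List.pyRange_one_eq_nil hna]
    have hd : dt.drop a.toNat = [] := List.drop_eq_nil_of_le (by omega)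
    simp [bCount, maskOf, hd, leadT]
  | succ k ih =>
    intro a c hk h0
    by_cases hna : (dt.length : Int) ≤ a
    · rw [PySem.List.pyRange_one_eq_nil hna]
      have hd : dt.drop a.toNat = [] := List.drop_eq_nil_of_le (by omega)
      simp [bCount, maskOf, hd, leadT]
    · have han : a < (dt.length : Int) := by omega
      obtain ⟨hlt, hdrop⟩ := drop_toNat_cons dt a h0 han
      have hval := pvVal_eq dt a h0 han hlt
      have hmask : maskOf dt a = (decide (dt[a.toNat] > 0)) :: maskOf dt (a + 1) := by
        simp [maskOf, hdrop]
      rw [PySem.List.pyRange_one_cons han, hmask]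
      by_cases hv : dt[a.toNat] > 0
      · have hle : ¬ pvVal dt a ≤ 0 := by rw [hval]; omega
        simp only [bCount, hle, if_false]
        rw [ih (a + 1) (c + 1) (by omega) (by omega)]
        simp only [leadT, decide_eq_true hv, if_true]
        ring
      · have hle : pvVal dt a ≤ 0 := by rw [hval]; omega
        simp only [bCount, hle, if_true]
        simp [leadT, decide_eq_false hv]

-- B's mask (from the slice) is maskOf, for a ≥ 0
theorem slice_mask (dt : List Int) (a : Int) (h0 : 0 ≤ a) :
    (PySem.List.slice dt (some a) none).map (fun v => decide (v > 0)) = maskOf dt a := by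
  rw [PySem.List.slice_from dt h0]; rfl

-- the main equivalence on the suffix starting at a
theorem main_lemma (dt : List Int) : ∀ (k : Nat) (a : Int), ((dt.length : Int) - a).toNat ≤ k →
    0 ≤ a → aLoop dt (PySem.List.pyRange a dt.length 1) (-1) 0 = data_up_count_alt dt a := by
  intro k
  induction k with
  | zero =>
    intro a hk h0
    have hna : (dt.length : Int) ≤ a := by omega
    rw [PySem.List.pyRange_one_eq_nil hna]
    unfold data_up_count_alt
    rw [slice_mask dt a h0]
    have : dt.drop a.toNat = [] := List.drop_eq_nil_of_le (by omega)
    simp [aLoop, maskOf, this]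
  | succ k ih =>
    intro a hk h0
    by_cases hna : (dt.length : Int) ≤ a
    · rw [PySem.List.pyRange_one_eq_nil hna]
      unfold data_up_count_alt
      rw [slice_mask dt a h0]
      have : dt.drop a.toNat = [] := List.drop_eq_nil_of_le (by omega)
      simp [aLoop, maskOf, this]
    · have han : a < (dt.length : Int) := by omega
      obtain ⟨hlt, hdrop⟩ := drop_toNat_cons dt a h0 han
      have hval := pvVal_eq dt a h0 han hlt
      have hmask : maskOf dt a = decide (dt[a.toNat] > 0) :: maskOf dt (a + 1) := by
        simp [maskOf, hdrop]
      rw [PySem.List.pyRange_one_cons han]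
      by_cases hv : dt[a.toNat] > 0
      · -- first positive found at a
        have hane : a ≠ -1 := by omega
        have hvv : pvVal dt a > 0 := by rw [hval]; exact hv
        have hstep : aLoop dt (a :: PySem.List.pyRange (a + 1) dt.length 1) (-1) 0
            = aLoop dt (PySem.List.pyRange (a + 1) dt.length 1) a 1 := by
          simp [aLoop, hvv, hane]
        rw [hstep, aLoop_count dt _ a 1 hane,
          countEq dt ((dt.length : Int) - (a + 1)).toNat (a + 1) 1 (le_refl _) (by omega)]
        unfold data_up_count_alt
        rw [slice_mask dt a h0, hmask]
        have htrue : (decide (dt[a.toNat] > 0)) = true := decide_eq_true hv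
        rw [htrue]
        have hmem : true ∈ (true :: maskOf dt (a + 1)) := List.mem_cons_self ..
        simp only [hmem, if_true, PySem.List.index?_cons_self, Option.getD_some]
        rw [show ((0 : Nat) : Int) = 0 from rfl, PySem.List.slice_zero_start,
          PySem.List.slice_none_none]
        rw [runEq (true :: maskOf dt (a + 1))]
        simp only [leadT, if_true, Prod.mk.injEq]
        exact ⟨by omega, trivial⟩
      · -- dt[a] ≤ 0: both sides skip a
        have hvv : ¬ pvVal dt a > 0 := by rw [hval]; omega
        have hstep : aLoop dt (a :: PySem.List.pyRange (a + 1) dt.length 1) (-1) 0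
            = aLoop dt (PySem.List.pyRange (a + 1) dt.length 1) (-1) 0 := by
          simp [aLoop, hvv]
        rw [hstep, ih (a + 1) (by omega) (by omega)]
        unfold data_up_count_alt
        rw [slice_mask dt a h0, slice_mask dt (a + 1) (by omega), hmask]
        have hfalse : (decide (dt[a.toNat] > 0)) = false := decide_eq_false hv
        rw [hfalse]
        set m := maskOf dt (a + 1) with hm
        by_cases hmem : true ∈ m
        · have hmem' : true ∈ (false :: m) := List.mem_cons_of_mem _ hmem
          have hs : (PySem.List.index? m true).isSome :=
            (PySem.List.index?_isSome_iff m true).mpr hmem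
          obtain ⟨j, hj⟩ := Option.isSome_iff_exists.mp hs
          have hidx : PySem.List.index? (false :: m) true = some (j + 1) := by
            rw [PySem.List.index?_cons_of_ne m (by decide : (false : Bool) ≠ true), hj]; rfl
          simp only [hmem, hmem', if_true, hidx, hj, Option.getD_some]
          have hrest : PySem.List.slice (false :: m) (some ((j + 1 : Nat) : Int)) none
              = PySem.List.slice m (some ((j : Nat) : Int)) none := by
            rw [PySem.List.slice_from _ (by positivity), PySem.List.slice_from _ (by positivity)]
            simp
          rw [hrest]
          simp only [Prod.mk.injEq]
          exact ⟨by push_cast; ring, trivial⟩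
        · have hmem' : true ∉ (false :: m) := by simp [hmem]
          simp [hmem, hmem']

-- ===== VERDICT (by name: the statement is the Claim_ definition above) =====
theorem data_up_count_spec : Claim_equal_data_up_count := by
  intro dt index _ hpre
  unfold Spec_data_up_count data_up_count
  exact main_lemma dt ((dt.length : Int) - index).toNat index (le_refl _) hpre
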